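-- pv_equiv track=rewrite | github.com/ChrisMaherLab/DANSR | src/filter_result.py | determine_feature_class
-- ===== SOURCE A (Python) =====
-- def determine_feature_class(f):
--
--     #set_small_types()
--
--     smallRNA = ['misc', 'piRNA', 'miRNA', 'rRNA', 'snRNA', 'snoRNA', 'tRNAs', 'Mt_rRNA', 'Mt_tRNA', 'misc_RNA', 'snRNA',
--                 'siRNA', 'vaultRNA','hg19_F_misc','hg19_F_piRNA','hg19_miRNA','hg19_rRna','hg19_snRna','hg19_snoRna','hg19_tRNAs']
--
--     protein_coding = ["protein_coding", "polymorphic_pseudogene", "TR_V_gene", "IG_V_gene", "IG_C_gene", "IG_J_gene", "TR_J_gene",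
--                       "TR_C_gene", "IG_D_gene", "TR_D_gene", "IG_LV_gene", "IG_M_gene", "IG_Z_gene", "nonsense_mediated_decay",
--                       "non_stop_decay", "nontranslating_CDS", "TR_gene"]
--
--     pseudogene = ["IG_C_pseudogene", "IG_J_pseudogene", "IG_V_pseudogene", "TR_J_pseudogene", "TR_V_pseudogene", "polymorphic_pseudogene", "processed_pseudogene",
--                   "pseudogene", "disrupted_domain", "IG_pseudogene", "transcribed_processed_pseudogene", "transcribed_unprocessed_pseudogene", "unitary_pseudogene",
--                   "translated_processed_pseudogene", "translated_unprocessed_pseudogene", "unprocessed_pseudogene", "transcribed_unitary_pseudogene"]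
--
--     lncrna = ["3prime_overlapping_ncrna", "antisense", "lincRNA", "processed_transcript","sense_intronic", "sense_overlapping", "non_coding", "retained_intron",
--               "hg19_lincRNAsTranscripts"]
--
--     sm_ctr = pc_ctr = ps_ctr = ln_ctr = all_ctr = 0
--
--     for x in range(len(f)):
--         #feature = f[x].replace("hg19_F_", "")
--         #feature = feature.replace("hg19_", "")
--         feature = f[x].split("(")[-1].replace(")", "")
--
--         sm = feature in smallRNA
--         pc = feature in protein_coding
--         ps = feature in pseudogene
--         ln = feature in lncrna
--
--         if sm is True:
--             sm_ctr += 1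
--         if pc is True:
--             pc_ctr += 1
--         if ps is True:
--             ps_ctr += 1
--         if ln is True:
--             ln_ctr += 1
--
--     if sm_ctr > 0:
--         if pc_ctr == 0 and ps_ctr == 0 and ln_ctr == 0:
--             cl_class = 'SM-ONLY'
--         elif pc_ctr > 0 and ps_ctr == 0 and ln_ctr == 0:
--             cl_class = 'SM-PC'
--         elif pc_ctr == 0 and ps_ctr > 0 and ln_ctr == 0:
--             cl_class = 'SM-PS'
--         elif pc_ctr == 0 and ps_ctr == 0 and ln_ctr > 0:
--             cl_class = 'SM-LN'
--         elif pc_ctr > 0 and ps_ctr > 0 and ln_ctr == 0: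
--             cl_class = "SM-PC-PS"
--         elif pc_ctr > 0 and ps_ctr == 0 and ln_ctr > 0:
--             cl_class = "SM-PC-LN"
--         elif pc_ctr == 0 and ps_ctr > 0 and ln_ctr > 0:
--             cl_class = "SM-PS-LN"
--         elif pc_ctr > 0 and ps_ctr > 0 and ln_ctr > 0:
--             cl_class = "SM-PC-PS-LN"
--         else:
--             cl_class = "NC"
--     else:
--         cl_class = 'NO-SM'
--
--     return (cl_class)
-- ===== SOURCE B (Python) =====
-- def determine_feature_class(f):
--     # one flat (feature, code) table; a dict index feature -> codes built once,
--     # then a single pass over f collecting the set of present codes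
--     pairs = [
--         ('misc', 'SM'), ('piRNA', 'SM'), ('miRNA', 'SM'), ('rRNA', 'SM'), ('snRNA', 'SM'),
--         ('snoRNA', 'SM'), ('tRNAs', 'SM'), ('Mt_rRNA', 'SM'), ('Mt_tRNA', 'SM'), ('misc_RNA', 'SM'),
--         ('snRNA', 'SM'), ('siRNA', 'SM'), ('vaultRNA', 'SM'), ('hg19_F_misc', 'SM'), ('hg19_F_piRNA', 'SM'),
--         ('hg19_miRNA', 'SM'), ('hg19_rRna', 'SM'), ('hg19_snRna', 'SM'), ('hg19_snoRna', 'SM'), ('hg19_tRNAs', 'SM'),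
--         ('protein_coding', 'PC'), ('polymorphic_pseudogene', 'PC'), ('TR_V_gene', 'PC'), ('IG_V_gene', 'PC'),
--         ('IG_C_gene', 'PC'), ('IG_J_gene', 'PC'), ('TR_J_gene', 'PC'), ('TR_C_gene', 'PC'), ('IG_D_gene', 'PC'),
--         ('TR_D_gene', 'PC'), ('IG_LV_gene', 'PC'), ('IG_M_gene', 'PC'), ('IG_Z_gene', 'PC'),
--         ('nonsense_mediated_decay', 'PC'), ('non_stop_decay', 'PC'), ('nontranslating_CDS', 'PC'), ('TR_gene', 'PC'),
--         ('IG_C_pseudogene', 'PS'), ('IG_J_pseudogene', 'PS'), ('IG_V_pseudogene', 'PS'), ('TR_J_pseudogene', 'PS'),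
--         ('TR_V_pseudogene', 'PS'), ('polymorphic_pseudogene', 'PS'), ('processed_pseudogene', 'PS'),
--         ('pseudogene', 'PS'), ('disrupted_domain', 'PS'), ('IG_pseudogene', 'PS'),
--         ('transcribed_processed_pseudogene', 'PS'), ('transcribed_unprocessed_pseudogene', 'PS'),
--         ('unitary_pseudogene', 'PS'), ('translated_processed_pseudogene', 'PS'),
--         ('translated_unprocessed_pseudogene', 'PS'), ('unprocessed_pseudogene', 'PS'),
--         ('transcribed_unitary_pseudogene', 'PS'),
--         ('3prime_overlapping_ncrna', 'LN'), ('antisense', 'LN'), ('lincRNA', 'LN'), ('processed_transcript', 'LN'),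
--         ('sense_intronic', 'LN'), ('sense_overlapping', 'LN'), ('non_coding', 'LN'), ('retained_intron', 'LN'),
--         ('hg19_lincRNAsTranscripts', 'LN'),
--     ]
--     index = {}
--     for feat, code in pairs:
--         index[feat] = index.get(feat, []) + [code]
--     present = set()
--     for x in f:
--         feature = x.split("(")[-1].replace(")", "")
--         present.update(index.get(feature, []))
--     if 'SM' not in present:
--         return 'NO-SM'
--     tail = '-'.join(c for c in ('PC', 'PS', 'LN') if c in present)
--     return 'SM-' + tail if tail else 'SM-ONLY'
-- ===== Notes on version B (the rewrite author's own statement) =====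
-- stated objective: faster
-- what changed: Replaces the four per-element membership scans with counters and the enumerated 8-way branch table by a flat (feature,code) table indexed once into a dict feature->codes, a single pass over f collecting the set of present codes by dict lookup, and programmatic label assembly with '-'.join in PC,PS,LN order.
import Mathlib
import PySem

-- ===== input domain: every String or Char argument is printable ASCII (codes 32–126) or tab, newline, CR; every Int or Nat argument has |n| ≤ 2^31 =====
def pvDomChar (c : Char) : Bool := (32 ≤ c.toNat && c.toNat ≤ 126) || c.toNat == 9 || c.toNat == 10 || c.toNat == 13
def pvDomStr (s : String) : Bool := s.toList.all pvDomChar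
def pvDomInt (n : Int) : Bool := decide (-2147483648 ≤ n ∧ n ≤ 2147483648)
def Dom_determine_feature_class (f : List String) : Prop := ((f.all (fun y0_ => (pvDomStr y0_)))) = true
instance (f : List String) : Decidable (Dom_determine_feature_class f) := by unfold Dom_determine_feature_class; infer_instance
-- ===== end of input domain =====

-- B replaces A's four membership-scan counters and 8-way branch table by a flat tagged
-- (feature, code) table indexed once into a dict, a single lookup pass collecting the set
-- of present codes, and label assembly by join (alternative algorithm; same return value).

-- ===== PORT A =====
-- A's four literal category lists
def pvSmallRNA : List String := ["misc", "piRNA", "miRNA", "rRNA", "snRNA", "snoRNA", "tRNAs", "Mt_rRNA", "Mt_tRNA", "misc_RNA", "snRNA",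
  "siRNA", "vaultRNA", "hg19_F_misc", "hg19_F_piRNA", "hg19_miRNA", "hg19_rRna", "hg19_snRna", "hg19_snoRna", "hg19_tRNAs"]
def pvProteinCoding : List String := ["protein_coding", "polymorphic_pseudogene", "TR_V_gene", "IG_V_gene", "IG_C_gene", "IG_J_gene", "TR_J_gene",
  "TR_C_gene", "IG_D_gene", "TR_D_gene", "IG_LV_gene", "IG_M_gene", "IG_Z_gene", "nonsense_mediated_decay",
  "non_stop_decay", "nontranslating_CDS", "TR_gene"]
def pvPseudogene : List String := ["IG_C_pseudogene", "IG_J_pseudogene", "IG_V_pseudogene", "TR_J_pseudogene", "TR_V_pseudogene", "polymorphic_pseudogene", "processed_pseudogene",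
  "pseudogene", "disrupted_domain", "IG_pseudogene", "transcribed_processed_pseudogene", "transcribed_unprocessed_pseudogene", "unitary_pseudogene",
  "translated_processed_pseudogene", "translated_unprocessed_pseudogene", "unprocessed_pseudogene", "transcribed_unitary_pseudogene"]
def pvLncrna : List String := ["3prime_overlapping_ncrna", "antisense", "lincRNA", "processed_transcript", "sense_intronic", "sense_overlapping", "non_coding", "retained_intron",
  "hg19_lincRNAsTranscripts"]

-- shared parsing expression (the same line of Python in A and B)  f[x].split("(")[-1].replace(")", "")   ([-1] never raises: split with a nonempty sep is nonempty)
def pvParse (x : String) : String :=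
  PySem.Str.replace (PySem.List.pyGetD ((PySem.Str.split? x "(").getD []) (-1) "") ")" ""

def determine_feature_class (f : List String) : String :=
  let st := f.foldl (fun (st : Int × Int × Int × Int) x =>
    let feature := pvParse x
    let sm := pvSmallRNA.contains feature
    let pc := pvProteinCoding.contains feature
    let ps := pvPseudogene.contains feature
    let ln := pvLncrna.contains feature
    let st := if sm then (st.1 + 1, st.2.1, st.2.2.1, st.2.2.2) else st
    let st := if pc then (st.1, st.2.1 + 1, st.2.2.1, st.2.2.2) else st
    let st := if ps then (st.1, st.2.1, st.2.2.1 + 1, st.2.2.2) else st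
    let st := if ln then (st.1, st.2.1, st.2.2.1, st.2.2.2 + 1) else st
    st) (0, 0, 0, 0)
  let sm_ctr := st.1; let pc_ctr := st.2.1; let ps_ctr := st.2.2.1; let ln_ctr := st.2.2.2
  if sm_ctr > 0 then
    if pc_ctr = 0 ∧ ps_ctr = 0 ∧ ln_ctr = 0 then "SM-ONLY"
    else if pc_ctr > 0 ∧ ps_ctr = 0 ∧ ln_ctr = 0 then "SM-PC"
    else if pc_ctr = 0 ∧ ps_ctr > 0 ∧ ln_ctr = 0 then "SM-PS"
    else if pc_ctr = 0 ∧ ps_ctr = 0 ∧ ln_ctr > 0 then "SM-LN"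
    else if pc_ctr > 0 ∧ ps_ctr > 0 ∧ ln_ctr = 0 then "SM-PC-PS"
    else if pc_ctr > 0 ∧ ps_ctr = 0 ∧ ln_ctr > 0 then "SM-PC-LN"
    else if pc_ctr = 0 ∧ ps_ctr > 0 ∧ ln_ctr > 0 then "SM-PS-LN"
    else if pc_ctr > 0 ∧ ps_ctr > 0 ∧ ln_ctr > 0 then "SM-PC-PS-LN"
    else "NC"
  else "NO-SM"

-- ===== PORT B =====
-- B's flat tagged table (same category data, as (feature, code) pairs)
def pvPairs : List (String × String) := [
  ("misc", "SM"), ("piRNA", "SM"), ("miRNA", "SM"), ("rRNA", "SM"), ("snRNA", "SM"),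
  ("snoRNA", "SM"), ("tRNAs", "SM"), ("Mt_rRNA", "SM"), ("Mt_tRNA", "SM"), ("misc_RNA", "SM"),
  ("snRNA", "SM"), ("siRNA", "SM"), ("vaultRNA", "SM"), ("hg19_F_misc", "SM"), ("hg19_F_piRNA", "SM"),
  ("hg19_miRNA", "SM"), ("hg19_rRna", "SM"), ("hg19_snRna", "SM"), ("hg19_snoRna", "SM"), ("hg19_tRNAs", "SM"),
  ("protein_coding", "PC"), ("polymorphic_pseudogene", "PC"), ("TR_V_gene", "PC"), ("IG_V_gene", "PC"),
  ("IG_C_gene", "PC"), ("IG_J_gene", "PC"), ("TR_J_gene", "PC"), ("TR_C_gene", "PC"), ("IG_D_gene", "PC"),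
  ("TR_D_gene", "PC"), ("IG_LV_gene", "PC"), ("IG_M_gene", "PC"), ("IG_Z_gene", "PC"),
  ("nonsense_mediated_decay", "PC"), ("non_stop_decay", "PC"), ("nontranslating_CDS", "PC"), ("TR_gene", "PC"),
  ("IG_C_pseudogene", "PS"), ("IG_J_pseudogene", "PS"), ("IG_V_pseudogene", "PS"), ("TR_J_pseudogene", "PS"),
  ("TR_V_pseudogene", "PS"), ("polymorphic_pseudogene", "PS"), ("processed_pseudogene", "PS"),
  ("pseudogene", "PS"), ("disrupted_domain", "PS"), ("IG_pseudogene", "PS"),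
  ("transcribed_processed_pseudogene", "PS"), ("transcribed_unprocessed_pseudogene", "PS"),
  ("unitary_pseudogene", "PS"), ("translated_processed_pseudogene", "PS"),
  ("translated_unprocessed_pseudogene", "PS"), ("unprocessed_pseudogene", "PS"),
  ("transcribed_unitary_pseudogene", "PS"),
  ("3prime_overlapping_ncrna", "LN"), ("antisense", "LN"), ("lincRNA", "LN"), ("processed_transcript", "LN"),
  ("sense_intronic", "LN"), ("sense_overlapping", "LN"), ("non_coding", "LN"), ("retained_intron", "LN"),
  ("hg19_lincRNAsTranscripts", "LN")]

-- index[feat] = index.get(feat, []) + [code]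
def pvIndex : PySem.Dict String (List String) :=
  pvPairs.foldl (fun d p => d.modify p.1 [] (fun cs => cs ++ [p.2])) PySem.Dict.empty

def determine_feature_class_alt (f : List String) : String :=
  let present : PySem.Set String :=
    f.foldl (fun s x => PySem.Set.update s (pvIndex.getD (pvParse x) [])) PySem.Set.empty
  if !(PySem.Set.contains present "SM") then "NO-SM"
  else
    let tail := PySem.Str.join "-" (["PC", "PS", "LN"].filter (fun c => PySem.Set.contains present c))
    if tail ≠ "" then "SM-" ++ tail else "SM-ONLY"

-- ===== PRECONDITION & SPEC =====
def Spec_determine_feature_class (f : List String) (out : String) : Prop := out = determine_feature_class_alt f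
instance (f : List String) (out : String) : Decidable (Spec_determine_feature_class f out) := by unfold Spec_determine_feature_class; infer_instance

-- ===== CLAIM (what is proved, stated in full; the proofs are below) =====
def Claim_equal_determine_feature_class : Prop := ∀ (f : List String), Dom_determine_feature_class f → Spec_determine_feature_class f (determine_feature_class f)

-- ===== LEMMAS AND PROOFS =====

-- A's loop adds, per category, the count of parsed features lying in that category
theorem pvLoop_eq (f : List String) (st : Int × Int × Int × Int) :
    f.foldl (fun (st : Int × Int × Int × Int) x =>
      let feature := pvParse x
      let sm := pvSmallRNA.contains feature
      let pc := pvProteinCoding.contains feature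
      let ps := pvPseudogene.contains feature
      let ln := pvLncrna.contains feature
      let st := if sm then (st.1 + 1, st.2.1, st.2.2.1, st.2.2.2) else st
      let st := if pc then (st.1, st.2.1 + 1, st.2.2.1, st.2.2.2) else st
      let st := if ps then (st.1, st.2.1, st.2.2.1 + 1, st.2.2.2) else st
      let st := if ln then (st.1, st.2.1, st.2.2.1, st.2.2.2 + 1) else st
      st) st
    = (st.1 + ((f.map pvParse).countP (fun y => pvSmallRNA.contains y) : Int),
       st.2.1 + ((f.map pvParse).countP (fun y => pvProteinCoding.contains y) : Int),
       st.2.2.1 + ((f.map pvParse).countP (fun y => pvPseudogene.contains y) : Int),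
       st.2.2.2 + ((f.map pvParse).countP (fun y => pvLncrna.contains y) : Int)) := by
  induction f generalizing st with
  | nil => simp
  | cons x xs ih =>
    simp only [List.foldl_cons, List.map_cons, List.countP_cons, ih]
    obtain ⟨a, b, c, d⟩ := st
    by_cases h1 : pvSmallRNA.contains (pvParse x) <;>
      by_cases h2 : pvProteinCoding.contains (pvParse x) <;>
      by_cases h3 : pvPseudogene.contains (pvParse x) <;>
      by_cases h4 : pvLncrna.contains (pvParse x) <;>
      simp only [h1, h2, h3, h4, if_true, if_false, Nat.cast_add, Nat.cast_one,
        Bool.false_eq_true, Prod.mk.injEq] <;>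
      refine ⟨by push_cast; ring, by push_cast; ring, by push_cast; ring, by push_cast; ring⟩

theorem pvCount_pos_iff (l : List String) (p : String → Bool) :
    (0 < (l.countP p : Int)) ↔ l.any p = true := by
  rw [List.any_eq_true]
  constructor
  · intro h
    have : 0 < l.countP p := by exact_mod_cast h
    obtain ⟨a, ha, hp⟩ := List.countP_pos_iff.mp this
    exact ⟨a, ha, hp⟩
  · intro ⟨a, ha, hp⟩
    exact_mod_cast List.countP_pos_iff.mpr ⟨a, ha, hp⟩

theorem pvCount_zero_iff (l : List String) (p : String → Bool) :
    ((l.countP p : Int) = 0) ↔ l.any p = false := by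
  have h := pvCount_pos_iff l p
  constructor
  · intro h0
    cases hb : l.any p
    · rfl
    · exfalso; have := h.mpr hb; omega
  · intro hb
    by_contra h0
    have hn : (0:Int) ≤ (l.countP p : Int) := by positivity
    have : 0 < (l.countP p : Int) := by omega
    rw [h] at this; simp_all

-- B's flat table is the four category lists tagged with their codes (definitional)
theorem pvPairs_eq : pvPairs =
    pvSmallRNA.map (fun s => (s, "SM")) ++ pvProteinCoding.map (fun s => (s, "PC")) ++
    pvPseudogene.map (fun s => (s, "PS")) ++ pvLncrna.map (fun s => (s, "LN")) := by rfl

-- the dict index maps a feature to exactly its tagged codes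
theorem pvIndex_getD (y : String) :
    pvIndex.getD y [] = (pvPairs.filter (fun p => p.1 == y)).map Prod.snd := by
  unfold pvIndex
  rw [PySem.Dict.getD_foldl_modify_append]
  simp [PySem.Dict.getD_empty]

-- membership in the accumulated set of codes
theorem pvMem_present (f : List String) (g : String → List String) (s : PySem.Set String) (c : String) :
    c ∈ f.foldl (fun s x => PySem.Set.update s (g x)) s ↔ c ∈ s ∨ ∃ x ∈ f, c ∈ g x := by
  induction f generalizing s with
  | nil => simp
  | cons x xs ih =>
    simp only [List.foldl_cons, ih, PySem.Set.mem_update, List.mem_cons]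
    constructor
    · rintro (((h | h) | ⟨a, ha, hc⟩))
      · exact Or.inl h
      · exact Or.inr ⟨x, Or.inl rfl, h⟩
      · exact Or.inr ⟨a, Or.inr ha, hc⟩
    · rintro (h | ⟨a, (rfl | ha), hc⟩)
      · exact Or.inl (Or.inl h)
      · exact Or.inl (Or.inr hc)
      · exact Or.inr ⟨a, ha, hc⟩

-- a code is among y's tagged codes iff y is in that code's category list
theorem pvCodes_SM (y : String) :
    ("SM" ∈ (pvPairs.filter (fun p => p.1 == y)).map Prod.snd) ↔ y ∈ pvSmallRNA := by
  rw [pvPairs_eq]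
  simp only [List.filter_append, List.filter_map, List.map_append, List.map_map,
    List.mem_append, List.mem_map, List.mem_filter, Function.comp]
  aesop

theorem pvCodes_PC (y : String) :
    ("PC" ∈ (pvPairs.filter (fun p => p.1 == y)).map Prod.snd) ↔ y ∈ pvProteinCoding := by
  rw [pvPairs_eq]
  simp only [List.filter_append, List.filter_map, List.map_append, List.map_map,
    List.mem_append, List.mem_map, List.mem_filter, Function.comp]
  aesop

theorem pvCodes_PS (y : String) :
    ("PS" ∈ (pvPairs.filter (fun p => p.1 == y)).map Prod.snd) ↔ y ∈ pvPseudogene := by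
  rw [pvPairs_eq]
  simp only [List.filter_append, List.filter_map, List.map_append, List.map_map,
    List.mem_append, List.mem_map, List.mem_filter, Function.comp]
  aesop

theorem pvCodes_LN (y : String) :
    ("LN" ∈ (pvPairs.filter (fun p => p.1 == y)).map Prod.snd) ↔ y ∈ pvLncrna := by
  rw [pvPairs_eq]
  simp only [List.filter_append, List.filter_map, List.map_append, List.map_map,
    List.mem_append, List.mem_map, List.mem_filter, Function.comp]
  aesop

-- present.contains code = "some parsed feature lies in code's category list"
theorem pvPresent_contains (f : List String) (code : String) (cat : List String)
    (h : ∀ y, (code ∈ (pvPairs.filter (fun p => p.1 == y)).map Prod.snd) ↔ y ∈ cat) :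
    PySem.Set.contains
      (f.foldl (fun s x => PySem.Set.update s (pvIndex.getD (pvParse x) [])) PySem.Set.empty) code
    = f.any (fun x => cat.contains (pvParse x)) := by
  have hpp : pvParse = pvParse := rfl
  rw [Bool.eq_iff_iff, PySem.Set.contains_iff, pvMem_present, List.any_eq_true]
  simp only [pvIndex_getD, hpp, h]
  constructor
  · rintro (h0 | ⟨x, hx, hc⟩)
    · cases h0
    · exact ⟨x, hx, by simpa using hc⟩
  · rintro ⟨x, hx, hc⟩
    exact Or.inr ⟨x, hx, by simpa using hc⟩

-- ===== VERDICT (by name: the statement is the Claim_ definition above) =====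
theorem determine_feature_class_spec : Claim_equal_determine_feature_class := by
  intro f _
  unfold Spec_determine_feature_class determine_feature_class determine_feature_class_alt
  simp only [pvLoop_eq, zero_add, gt_iff_lt, List.filter_cons, List.filter_nil]
  rw [pvPresent_contains f "SM" pvSmallRNA pvCodes_SM,
      pvPresent_contains f "PC" pvProteinCoding pvCodes_PC,
      pvPresent_contains f "PS" pvPseudogene pvCodes_PS,
      pvPresent_contains f "LN" pvLncrna pvCodes_LN]
  set fs := f.map pvParse with hfs
  have E1 := propext (pvCount_pos_iff fs (fun y => pvSmallRNA.contains y))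
  have E2 := propext (pvCount_pos_iff fs (fun y => pvProteinCoding.contains y))
  have E3 := propext (pvCount_pos_iff fs (fun y => pvPseudogene.contains y))
  have E4 := propext (pvCount_pos_iff fs (fun y => pvLncrna.contains y))
  have F1 := propext (pvCount_zero_iff fs (fun y => pvSmallRNA.contains y))
  have F2 := propext (pvCount_zero_iff fs (fun y => pvProteinCoding.contains y))
  have F3 := propext (pvCount_zero_iff fs (fun y => pvPseudogene.contains y))
  have F4 := propext (pvCount_zero_iff fs (fun y => pvLncrna.contains y))
  have hany : ∀ (L : List String), fs.any (fun y => L.contains y) = f.any (fun x => L.contains (pvParse x)) := by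
    intro L; rw [hfs, List.any_map]; rfl
  simp only [E1, E2, E3, E4, F1, F2, F3, F4, hany]
  cases h1 : f.any (fun x => pvSmallRNA.contains (pvParse x)) <;>
    cases h2 : f.any (fun x => pvProteinCoding.contains (pvParse x)) <;>
      cases h3 : f.any (fun x => pvPseudogene.contains (pvParse x)) <;>
        cases h4 : f.any (fun x => pvLncrna.contains (pvParse x)) <;>
          simp only [h1, h2, h3, h4, List.filter_cons, List.filter_nil, if_true, if_false,
            Bool.not_true, Bool.not_false, reduceCtorEq] <;>
          simp [PySem.Str.join] <;> decide
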